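-- pv_equiv track=rewrite | github.com/coopersigrist/SunSight | Simulation/projections_util.py | get_zips_of_first_nth_panels
-- ===== SOURCE A (Python) =====
-- def get_zips_of_first_nth_panels(n_panels:int, panel_placements:dict) -> dict:
--
--     partial_panel_placements = dict()
--
--     total = 0
--     for val in panel_placements.values():
--         total += val
--
--     panel_counter = 0
--     for zip in panel_placements:
--         if panel_placements[zip] + panel_counter < n_panels:
--             partial_panel_placements[zip] = panel_placements[zip]
--             panel_counter += panel_placements[zip]
--         else:
--             partial_panel_placements[zip] = n_panels - panel_counter
--             return partial_panel_placements
--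
--     raise ValueError("Tried to get zip of panel number "+ str(n_panels) + " but there were not that many placed panels in the given dict")
-- ===== SOURCE B (Python) =====
-- def get_zips_of_first_nth_panels(n_panels: int, panel_placements: dict) -> dict:
--     items = list(panel_placements.items())
--     # cumulative-sum table of the panel counts
--     cums = []
--     t = 0
--     for _, v in items:
--         t += v
--         cums.append(t)
--     # first position whose cumulative count reaches n_panels (linear scan: no monotonicity assumed)
--     i = next((j for j, c in enumerate(cums) if c >= n_panels), None)
--     if i is None:
--         raise ValueError("Tried to get zip of panel number " + str(n_panels) + " but there were not that many placed panels in the given dict")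
--     out = dict(items[:i])
--     out[items[i][0]] = n_panels - (cums[i - 1] if i > 0 else 0)
--     return out
-- ===== Notes on version B (the rewrite author's own statement) =====
-- stated objective: alternative
-- what changed: B precomputes a cumulative-sum table, locates the cutoff index with a single linear scan, and builds the result as a slice of the items plus one truncated entry, instead of A's single accumulating loop that copies entries as it goes.
import Mathlib
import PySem

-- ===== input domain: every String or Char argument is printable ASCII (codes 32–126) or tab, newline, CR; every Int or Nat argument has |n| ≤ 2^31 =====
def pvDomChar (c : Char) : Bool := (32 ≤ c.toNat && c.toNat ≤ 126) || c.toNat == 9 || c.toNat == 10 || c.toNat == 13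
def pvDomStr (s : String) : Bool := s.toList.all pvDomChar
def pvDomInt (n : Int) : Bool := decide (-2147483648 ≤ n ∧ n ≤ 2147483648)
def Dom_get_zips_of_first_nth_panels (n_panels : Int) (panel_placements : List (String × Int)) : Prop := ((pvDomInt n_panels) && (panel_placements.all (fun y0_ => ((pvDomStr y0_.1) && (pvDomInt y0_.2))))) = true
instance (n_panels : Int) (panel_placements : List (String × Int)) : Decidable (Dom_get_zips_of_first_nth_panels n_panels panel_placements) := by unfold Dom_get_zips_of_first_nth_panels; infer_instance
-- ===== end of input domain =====

-- B replaces A's accumulating copy-loop by a precomputed cumulative-sum table, a linear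
-- cutoff-index search, and a take-plus-truncated-entry construction (alternative decomposition).


-- ===== PORT A =====
-- A's main loop: panel_counter accumulates, entries are copied into the growing partial dict;
-- the 'raise' path (loop falls through) returns [] and is excluded by Pre_.
def pvGoA (n : Int) (counter : Int) (acc : List (String × Int)) :
    List (String × Int) → List (String × Int)
  | [] => []
  | (z, v) :: rest =>
    if v + counter < n then pvGoA n (counter + v) (acc ++ [(z, v)]) rest
    else acc ++ [(z, n - counter)]

def get_zips_of_first_nth_panels (n_panels : Int) (panel_placements : List (String × Int)) : List (String × Int) :=
  -- A first computes 'total' (dead code in A; kept for faithfulness)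
  let _total : Int := panel_placements.foldl (fun a p => a + p.2) 0
  pvGoA n_panels 0 [] panel_placements

-- ===== PORT B =====
-- cumulative sums of the counts, with running total t (port of B's accumulation loop)
def pvCums (t : Int) : List Int → List Int
  | [] => []
  | v :: vs => (t + v) :: pvCums (t + v) vs

def get_zips_of_first_nth_panels_alt (n_panels : Int) (panel_placements : List (String × Int)) : List (String × Int) :=
  let items := panel_placements
  let cums := pvCums 0 (items.map Prod.snd)
  match List.findIdx? (fun c => decide (n_panels ≤ c)) cums with
  | none => []       -- B raises here; excluded by Pre_
  | some i =>
    let prev := if 0 < i then cums.getD (i - 1) 0 else 0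
    items.take i ++ [((items.getD i ("", 0)).1, n_panels - prev)]

-- ===== PRECONDITION & SPEC =====
-- Pre_ excludes exactly the inputs on which both A and B raise ValueError:
-- those where no prefix of the counts reaches n_panels.
def Pre_get_zips_of_first_nth_panels (n_panels : Int) (panel_placements : List (String × Int)) : Prop :=
  ∃ i < panel_placements.length,
    n_panels ≤ (((panel_placements.map Prod.snd).take (i + 1)).sum)
instance (n_panels : Int) (panel_placements : List (String × Int)) : Decidable (Pre_get_zips_of_first_nth_panels n_panels panel_placements) := by unfold Pre_get_zips_of_first_nth_panels; infer_instance

def pvWitness_get_zips_of_first_nth_panels : Int × (List (String × Int)) := (3, [("90210", 2), ("10001", 5)])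

def Spec_get_zips_of_first_nth_panels (n_panels : Int) (panel_placements : List (String × Int)) (out : List (String × Int)) : Prop := out = get_zips_of_first_nth_panels_alt n_panels panel_placements
instance (n_panels : Int) (panel_placements : List (String × Int)) (out : List (String × Int)) : Decidable (Spec_get_zips_of_first_nth_panels n_panels panel_placements out) := by unfold Spec_get_zips_of_first_nth_panels; infer_instance

-- ===== CLAIM (what is proved, stated in full; the proofs are below) =====
def Claim_equal_get_zips_of_first_nth_panels : Prop := ∀ (n_panels : Int) (panel_placements : List (String × Int)), Dom_get_zips_of_first_nth_panels n_panels panel_placements → Pre_get_zips_of_first_nth_panels n_panels panel_placements → Spec_get_zips_of_first_nth_panels n_panels panel_placements (get_zips_of_first_nth_panels n_panels panel_placements)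

-- ===== LEMMAS AND PROOFS =====

-- common reference recursion: remaining budget m, copy while v < m, truncate at the cutoff
def pvSpecRef (m : Int) : List (String × Int) → List (String × Int)
  | [] => []
  | (z, v) :: rest => if v < m then (z, v) :: pvSpecRef (m - v) rest else [(z, m)]

theorem pre_nil (n : Int) : ¬ Pre_get_zips_of_first_nth_panels n [] := by
  rintro ⟨i, hi, _⟩; simp at hi

theorem pre_cons (n : Int) (z : String) (v : Int) (pp : List (String × Int)) :
    Pre_get_zips_of_first_nth_panels n ((z, v) :: pp) ↔
      n ≤ v ∨ Pre_get_zips_of_first_nth_panels (n - v) pp := by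
  constructor
  · rintro ⟨i, hi, hs⟩
    cases i with
    | zero => left; simpa using hs
    | succ i' =>
      right; exact ⟨i', by simpa using hi, by simp at hs; omega⟩
  · rintro (h | ⟨i, hi, hs⟩)
    · exact ⟨0, by simp, by simpa using h⟩
    · exact ⟨i + 1, by simpa using hi, by simp; omega⟩

theorem goA_eq_ref (pp : List (String × Int)) :
    ∀ (n c : Int) (acc : List (String × Int)),
      Pre_get_zips_of_first_nth_panels (n - c) pp →
      pvGoA n c acc pp = acc ++ pvSpecRef (n - c) pp := by
  induction pp with
  | nil => intro n c acc h; exact absurd h (pre_nil _)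
  | cons hd tl ih =>
    intro n c acc h
    obtain ⟨z, v⟩ := hd
    rw [pre_cons] at h
    by_cases hv : v + c < n
    · have hlt : v < n - c := by omega
      have h' : Pre_get_zips_of_first_nth_panels (n - c - v) tl := by
        rcases h with h | h
        · omega
        · simpa using h
      rw [pvGoA, if_pos hv, pvSpecRef, if_pos hlt]
      have := ih n (c + v) (acc ++ [(z, v)]) (by simpa [sub_sub] using h')
      rw [this]; simp [sub_sub]
    · rw [pvGoA, if_neg hv, pvSpecRef, if_neg (by omega)]

theorem pvFindIdx?_congr {α : Type} (p q : α → Bool) (l : List α)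
    (h : ∀ a ∈ l, p a = q a) : List.findIdx? p l = List.findIdx? q l := by
  induction l with
  | nil => simp
  | cons a l ih =>
    rw [List.findIdx?_cons, List.findIdx?_cons, h a (by simp),
        ih (fun b hb => h b (List.mem_cons_of_mem _ hb))]

theorem cums_shift (xs : List Int) :
    ∀ t : Int, pvCums t xs = (pvCums 0 xs).map (fun c => t + c) := by
  induction xs with
  | nil => intro t; simp [pvCums]
  | cons v vs ih =>
    intro t
    rw [pvCums, pvCums, ih (t + v), ih (0 + v)]
    simp [List.map_map, Function.comp_def, add_assoc]

theorem alt_eq_ref (pp : List (String × Int)) :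
    ∀ n : Int, Pre_get_zips_of_first_nth_panels n pp →
      get_zips_of_first_nth_panels_alt n pp = pvSpecRef n pp := by
  induction pp with
  | nil => intro n h; exact absurd h (pre_nil _)
  | cons hd tl ih =>
    intro n h
    obtain ⟨z, v⟩ := hd
    rw [pre_cons] at h
    unfold get_zips_of_first_nth_panels_alt
    simp only [List.map_cons, pvCums, zero_add]
    rw [cums_shift (tl.map Prod.snd) v]
    by_cases hv : v < n
    · have h' : Pre_get_zips_of_first_nth_panels (n - v) tl := by
        rcases h with h | h
        · omega
        · exact h
      have hfind0 : (decide (n ≤ v)) = false := by simp; omega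
      have hmapfind : List.findIdx? (fun c => decide (n ≤ c))
            ((pvCums 0 (tl.map Prod.snd)).map (fun c => v + c))
          = List.findIdx? (fun c => decide (n - v ≤ c)) (pvCums 0 (tl.map Prod.snd)) := by
        rw [List.findIdx?_map]
        apply pvFindIdx?_congr
        intro c _; simp [Function.comp]; omega
      rw [List.findIdx?_cons, hfind0]
      rw [hmapfind]
      have halt := ih (n - v) h'
      unfold get_zips_of_first_nth_panels_alt at halt
      rw [pvSpecRef, if_pos hv]
      cases hfi : List.findIdx? (fun c => decide (n - v ≤ c)) (pvCums 0 (tl.map Prod.snd)) with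
      | none =>
        exfalso
        -- Pre on tl means some cumulative reaches n - v, so findIdx? cannot be none
        simp only [hfi] at halt
        obtain ⟨i, hi, hs⟩ := h'
        -- pvSpecRef never returns [] … derive contradiction via halt : [] = pvSpecRef (n-v) tl
        have : pvSpecRef (n - v) tl ≠ [] := by
          cases tl with
          | nil => simp at hi
          | cons a b => obtain ⟨za, va⟩ := a; rw [pvSpecRef]; split <;> simp
        exact this (by simpa using halt.symm)
      | some i =>
        simp only [hfi] at halt
        simp only [Bool.false_eq_true, if_false, Option.map_some]
        have hlen : i < (pvCums 0 (tl.map Prod.snd)).length :=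
          (List.findIdx?_eq_some_iff_findIdx_eq.mp hfi).1
        rw [← halt]
        simp only [List.take_succ_cons, List.getD_cons_succ, List.cons_append,
          Nat.add_sub_cancel, Nat.succ_pos, if_true]
        cases i with
        | zero => simp
        | succ i' =>
          have hi' : i' < (pvCums 0 (tl.map Prod.snd)).length := by
            simpa using Nat.lt_of_succ_lt hlen
          have hm : (List.map (fun c => v + c) (pvCums 0 (tl.map Prod.snd))).getD i' 0
              = v + (pvCums 0 (tl.map Prod.snd)).getD i' 0 := by
            rw [List.getD_eq_getElem _ _ (by simpa using hi'), List.getD_eq_getElem _ _ hi']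
            simp
          simp only [List.getD_cons_succ, hm, Nat.add_sub_cancel, if_pos (Nat.succ_pos i')]
          simp [sub_sub]
    · rw [pvSpecRef, if_neg hv]
      rw [List.findIdx?_cons]
      have : (decide (n ≤ v)) = true := by simp; omega
      rw [this]
      simp

-- ===== VERDICT (by name: the statement is the Claim_ definition above) =====
theorem get_zips_of_first_nth_panels_spec : Claim_equal_get_zips_of_first_nth_panels := by
  intro n pp _ hpre
  unfold Spec_get_zips_of_first_nth_panels
  unfold get_zips_of_first_nth_panels
  rw [alt_eq_ref pp n hpre]
  simpa using goA_eq_ref pp n 0 [] (by simpa using hpre)
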